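-- pv_equiv track=rewrite | github.com/gmiaslab/pyiomica | pyiomica/frequencySubjectMatch.py | getCommunityStructure
-- ===== SOURCE A (Python) =====
-- from copy import deepcopy
--
-- def getCommunityStructure(cs):
--     '''
--     To change community structure from {node1:community1, node2:community2,...} to
--     {community1:[node1, node2,...], community2:[node3, node4,...]}
--
--     Parameters:
--         cs: dictionary
--             the community structure as {node1:community1, node2:community2,...}
--
--     Returns:
--         community_structure: dictionary
--             the community structure as {community1:[node1, node2,...], community2:[node3, node4,...]}
--     '''
--     commu_list = list(cs.values())
--     community_structure = {}
--     for commu in commu_list: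
--         templist = []
--         for k,v in cs.items():
--             if int(v) == int(commu):
--                 templist.append(k)
--         community_structure[commu] = deepcopy(templist)
--     return community_structure
-- ===== SOURCE B (Python) =====
-- def getCommunityStructure(cs):
--     community_structure = {}
--     for k, v in cs.items():
--         community_structure.setdefault(v, []).append(k)
--     return community_structure
-- ===== Notes on version B (the rewrite author's own statement) =====
-- stated objective: faster
-- what changed: Replaces A's per-value rescan of all dict items (one full pass over the items for every value in the values list) by a single pass that appends each key to the setdefault-group of its value.
import Mathlib
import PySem

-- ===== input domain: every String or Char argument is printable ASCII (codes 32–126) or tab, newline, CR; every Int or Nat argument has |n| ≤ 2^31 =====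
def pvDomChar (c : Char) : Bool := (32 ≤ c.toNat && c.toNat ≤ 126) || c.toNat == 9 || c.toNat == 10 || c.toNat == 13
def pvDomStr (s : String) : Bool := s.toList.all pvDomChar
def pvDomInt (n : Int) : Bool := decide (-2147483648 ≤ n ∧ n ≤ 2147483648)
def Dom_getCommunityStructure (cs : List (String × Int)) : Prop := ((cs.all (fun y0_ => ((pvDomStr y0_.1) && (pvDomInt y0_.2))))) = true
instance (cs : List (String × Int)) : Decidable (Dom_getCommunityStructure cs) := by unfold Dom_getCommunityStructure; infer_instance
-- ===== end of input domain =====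

-- B replaces A's per-value rescan of all dict items by a single grouping pass (setdefault/append); return values are proved identical.

-- ===== PORT A =====
-- for commu in list(cs.values()): scan all items collecting keys with int(v) == int(commu) (identity on ints),
-- then community_structure[commu] = deepcopy(templist) (deepcopy of a list of strings returns an equal list).
def getCommunityStructure (cs : List (String × Int)) : List (Int × List String) :=
  ((cs.map (fun kv => kv.2)).foldl
    (fun (d : PySem.Dict Int (List String)) commu =>
      d.insert commu
        (cs.foldl (fun tl kv => if kv.2 == commu then tl ++ [kv.1] else tl) ([] : List String)))
    PySem.Dict.empty).items

-- ===== PORT B =====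
-- one pass: community_structure.setdefault(v, []).append(k) == d[v] = d.get(v, []) + [k] == Dict.modify
def getCommunityStructure_alt (cs : List (String × Int)) : List (Int × List String) :=
  (cs.foldl
    (fun (d : PySem.Dict Int (List String)) kv => d.modify kv.2 [] (fun l => l ++ [kv.1]))
    PySem.Dict.empty).items

-- ===== PRECONDITION & SPEC =====
def Spec_getCommunityStructure (cs : List (String × Int)) (out : List (Int × List String)) : Prop := out = getCommunityStructure_alt cs
instance (cs : List (String × Int)) (out : List (Int × List String)) : Decidable (Spec_getCommunityStructure cs out) := by unfold Spec_getCommunityStructure; infer_instance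

-- ===== CLAIM (what is proved, stated in full; the proofs are below) =====
def Claim_equal_getCommunityStructure : Prop := ∀ (cs : List (String × Int)), Dom_getCommunityStructure cs → Spec_getCommunityStructure cs (getCommunityStructure cs)

-- ===== LEMMAS AND PROOFS =====

-- A's outer loop inserts, at key x, a payload depending only on x: the final lookup is the payload if the key occurred.
theorem getD_foldl_insert_payload (l : List Int) (f : Int → List String)
    (d : PySem.Dict Int (List String)) (c : Int) :
    (l.foldl (fun d x => d.insert x (f x)) d).getD c [] = if c ∈ l then f c else d.getD c [] := by
  induction l generalizing d with
  | nil => simp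
  | cons a l ih =>
      simp only [List.foldl_cons, ih, PySem.Dict.getD_insert, List.mem_cons]
      by_cases h1 : c ∈ l <;> by_cases h2 : c = a <;> simp [h1, h2]

theorem getCommunityStructure_eq_alt (cs : List (String × Int)) :
    getCommunityStructure cs = getCommunityStructure_alt cs := by
  unfold getCommunityStructure getCommunityStructure_alt
  have hndA := PySem.Dict.nodup_keys_foldl_insert (cs.map (fun kv => kv.2))
      (fun _ commu => cs.foldl (fun tl kv => if kv.2 == commu then tl ++ [kv.1] else tl) ([] : List String))
      PySem.Dict.empty (by simp [PySem.Dict.keys_empty])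
  have hndB := PySem.Dict.nodup_keys_foldl_modify_key cs (fun kv => kv.2) ([] : List String)
      (fun _ kv l => l ++ [kv.1]) PySem.Dict.empty (by simp [PySem.Dict.keys_empty])
  rw [PySem.Dict.items_eq_map_keys _ hndA ([] : List String),
      PySem.Dict.items_eq_map_keys _ hndB ([] : List String),
      PySem.Dict.keys_foldl_insert, PySem.Dict.keys_foldl_modify_key]
  apply List.map_congr_left
  intro c hc
  have hcmem : c ∈ cs.map (fun kv => kv.2) := by
    rcases (PySem.Set.mem_update _ _ _).1 hc with h | h
    · simp [PySem.Dict.keys_empty] at h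
    · exact h
  have hB : cs.foldl (fun (d : PySem.Dict Int (List String)) kv => d.modify kv.2 [] (fun l => l ++ [kv.1])) PySem.Dict.empty
      = (cs.map Prod.swap).foldl (fun (d : PySem.Dict Int (List String)) p => d.modify p.1 [] (fun l => l ++ [p.2])) PySem.Dict.empty := by
    rw [List.foldl_map]
    rfl
  rw [getD_foldl_insert_payload, hB, PySem.Dict.getD_foldl_modify_append]
  simp only [hcmem, if_true, PySem.Dict.getD_empty, List.nil_append,
    List.filter_map, List.map_map, PySem.List.foldl_append_if]
  rfl

-- ===== VERDICT (by name: the statement is the Claim_ definition above) =====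
theorem getCommunityStructure_spec : Claim_equal_getCommunityStructure := by
  intro cs _
  unfold Spec_getCommunityStructure
  exact getCommunityStructure_eq_alt cs
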